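-- pv_equiv track=rewrite | github.com/aisworya96/string_practise_set | src/largest_frequency_char_sym.py | larger_frequency_char_sym
-- ===== SOURCE A (Python) =====
-- def larger_frequency_char_sym(input_string):
--     y = input_string.lower()
--     dict_alphabet ={}
--     dict_non_alphabet ={}
--
--     for x in y:
--         if x.isalpha():
--             if x in dict_alphabet:
--                 dict_alphabet[x] = dict_alphabet[x] + 1
--             else:
--                 dict_alphabet[x] = 1
--
--         elif not x.isspace():
--             if x in dict_non_alphabet:
--                 dict_non_alphabet[x] = dict_non_alphabet[x] + 1
--             else:
--                 dict_non_alphabet[x] = 1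
--
--
--     max_alphabetic_character = ''
--     max_count_alphabetic_character = 0
--
--     for x, count in dict_alphabet.items():
--         if count > max_count_alphabetic_character:
--             max_alphabetic_character = x
--             max_count_alphabetic_character = count
--
--     max_non_alphabetic_character = ''
--     max_count_non_alphabetic_character = 0
--
--     for x, count in dict_non_alphabet.items():
--         if count > max_count_non_alphabetic_character:
--             max_non_alphabetic_character = x
--             max_count_non_alphabetic_character = count
--
--
--     return f"Alphabetic: {max_alphabetic_character} = {max_count_alphabetic_character}," \
--            f" Non-Alphabetic: {max_non_alphabetic_character} = {max_count_non_alphabetic_character}"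
-- ===== SOURCE B (Python) =====
-- def larger_frequency_char_sym(input_string):
--     y = input_string.lower()
--     alphas = [c for c in y if c.isalpha()]
--     syms = [c for c in y if not c.isalpha() and not c.isspace()]
--
--     def best(lst):
--         if not lst:
--             return '', 0
--         b = max(dict.fromkeys(lst), key=lst.count)
--         return b, lst.count(b)
--
--     a_ch, a_cnt = best(alphas)
--     n_ch, n_cnt = best(syms)
--     return f"Alphabetic: {a_ch} = {a_cnt}, Non-Alphabetic: {n_ch} = {n_cnt}"
-- ===== Notes on version B (the rewrite author's own statement) =====
-- stated objective: simpler
-- what changed: Replaces the two hand-maintained counting dicts and the explicit strict-> running-max scans over dict items by two filtered lists and max(lst, key=lst.count), relying on max returning the first maximal element to reproduce the insertion-order tie-break.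
import Mathlib
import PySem

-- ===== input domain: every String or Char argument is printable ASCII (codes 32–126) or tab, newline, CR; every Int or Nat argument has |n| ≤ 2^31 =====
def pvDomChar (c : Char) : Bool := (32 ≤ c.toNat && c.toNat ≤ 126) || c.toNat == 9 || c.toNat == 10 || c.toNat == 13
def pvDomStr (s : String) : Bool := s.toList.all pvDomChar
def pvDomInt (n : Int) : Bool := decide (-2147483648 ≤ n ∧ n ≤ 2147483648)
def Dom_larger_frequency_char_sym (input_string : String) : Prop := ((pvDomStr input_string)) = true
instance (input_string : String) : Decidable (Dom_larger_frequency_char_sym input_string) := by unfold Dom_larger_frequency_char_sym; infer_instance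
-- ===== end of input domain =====

-- B replaces A's hand-maintained counting dicts and strict-> running-max scans by filtered
-- lists and max(lst, key=lst.count) (simpler); proved to return the same string on the domain.


-- ===== PORT A =====
-- the shared f-string "Alphabetic: {c} = {n}, Non-Alphabetic: {c} = {n}" (identical in both Pythons)
def pvFmt (ach : List Char) (ac : Int) (nch : List Char) (nc : Int) : String :=
  String.ofList ("Alphabetic: ".toList ++ ach ++ " = ".toList ++ PySem.Int.toChars ac
    ++ ", Non-Alphabetic: ".toList ++ nch ++ " = ".toList ++ PySem.Int.toChars nc)

-- loop 1: route each char into dict_alphabet / dict_non_alphabet and bump its count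
def pvStepA (st : PySem.Dict Char Int × PySem.Dict Char Int) (x : Char) :
    PySem.Dict Char Int × PySem.Dict Char Int :=
  if PySem.Chars.isalpha x then
    (if st.1.contains x then st.1.insert x (st.1.getD x 0 + 1) else st.1.insert x 1, st.2)
  else if !PySem.Chars.isspace x then
    (st.1, if st.2.contains x then st.2.insert x (st.2.getD x 0 + 1) else st.2.insert x 1)
  else st

-- loops 2/3: running max over dict items with strict '>' ('' as the empty char list, count 0)
def pvScan (st : List Char × Int) (p : Char × Int) : List Char × Int :=
  if p.2 > st.2 then ([p.1], p.2) else st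

def larger_frequency_char_sym (input_string : String) : String :=
  let y := PySem.Chars.lower input_string.toList
  let ds := y.foldl pvStepA (PySem.Dict.empty, PySem.Dict.empty)
  let a := ds.1.items.foldl pvScan ([], 0)
  let n := ds.2.items.foldl pvScan ([], 0)
  pvFmt a.1 a.2 n.1 n.2

-- ===== PORT B =====
-- best(lst): ('', 0) on [], else (max(dict.fromkeys(lst), key=lst.count), lst.count(best))
def pvBest (lst : List Char) : List Char × Int :=
  match PySem.List.max? (PySem.List.dedup lst) (fun c => lst.count c) with
  | none => ([], 0)
  | some b => ([b], (lst.count b : Int))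

def larger_frequency_char_sym_alt (input_string : String) : String :=
  let ys := PySem.Chars.lower input_string.toList
  let alphas := ys.filter (fun c => PySem.Chars.isalpha c)
  let syms := ys.filter (fun c => !PySem.Chars.isalpha c && !PySem.Chars.isspace c)
  let a := pvBest alphas
  let n := pvBest syms
  pvFmt a.1 a.2 n.1 n.2

-- ===== PRECONDITION & SPEC =====
def Spec_larger_frequency_char_sym (input_string : String) (out : String) : Prop := out = larger_frequency_char_sym_alt input_string
instance (input_string : String) (out : String) : Decidable (Spec_larger_frequency_char_sym input_string out) := by unfold Spec_larger_frequency_char_sym; infer_instance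

-- ===== CLAIM (what is proved, stated in full; the proofs are below) =====
def Claim_equal_larger_frequency_char_sym : Prop := ∀ (input_string : String), Dom_larger_frequency_char_sym input_string → Spec_larger_frequency_char_sym input_string (larger_frequency_char_sym input_string)

-- ===== LEMMAS AND PROOFS =====

-- the step of PySem.List.max? with an Int-valued key
def pvMStep {α : Type} (key : α → Int) (acc : Option α) (x : α) : Option α :=
  match acc with
  | none => some x
  | some m => if key m < key x then some x else some m

theorem pvMax?_nat_cast {α : Type} (xs : List α) (key : α → Nat) :
    PySem.List.max? xs (fun x => key x) = xs.foldl (pvMStep (fun x => (key x : Int))) none := by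
  rw [show PySem.List.max? xs (fun x => key x)
      = xs.foldl (fun acc x => match acc with
          | none => some x
          | some m => if key m < key x then some x else some m) none from rfl]
  congr 1
  funext acc x
  cases acc with
  | none => rfl
  | some m => simp [pvMStep]

theorem pvFold_mstep_map {α β : Type} (f : α → β) (key : β → Int) :
    ∀ (xs : List α) (acc : Option α),
      (xs.map f).foldl (pvMStep key) (acc.map f)
        = (xs.foldl (pvMStep (fun a => key (f a))) acc).map f := by
  intro xs
  induction xs with
  | nil => intro acc; rfl
  | cons x t ih =>
    intro acc
    have hstep : pvMStep key (acc.map f) (f x) = (pvMStep (fun a => key (f a)) acc x).map f := by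
      cases acc with
      | none => rfl
      | some m => simp only [pvMStep, Option.map_some]; split_ifs <;> rfl
    simp only [List.map_cons, List.foldl_cons, hstep, ih]

-- relate A's strict-'>' scan state to the max? fold state
def pvOut (o : Option (Char × Int)) : List Char × Int :=
  match o with
  | none => ([], 0)
  | some r => ([r.1], r.2)

theorem pvScan_sim : ∀ (t : List (Char × Int)) (q : Char × Int),
    t.foldl pvScan ([q.1], q.2) = pvOut (t.foldl (pvMStep (fun p => p.2)) (some q)) := by
  intro t
  induction t with
  | nil => intro q; rfl
  | cons p t ih =>
    intro q
    by_cases h : q.2 < p.2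
    · simp only [List.foldl_cons, pvScan, pvMStep, gt_iff_lt, if_pos h]
      exact ih p
    · simp only [List.foldl_cons, pvScan, pvMStep, gt_iff_lt, if_neg h]
      exact ih q

theorem pvScan_pos (ds : List (Char × Int)) (h : ∀ p ∈ ds, 0 < p.2) :
    ds.foldl pvScan ([], 0) = pvOut (ds.foldl (pvMStep (fun p => p.2)) none) := by
  cases ds with
  | nil => rfl
  | cons p t =>
    have hp : 0 < p.2 := h p (List.mem_cons_self ..)
    simp only [List.foldl_cons, pvScan, pvMStep, gt_iff_lt, if_pos hp]
    exact pvScan_sim t p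

-- A's scan over Counter(l).items equals B's pvBest l
theorem pvItems_scan (l : List Char) :
    (PySem.Dict.counter l : PySem.Dict Char Int).items.foldl pvScan ([], 0) = pvBest l := by
  rw [PySem.Dict.items_counter]
  rw [pvScan_pos _ (by
    intro p hp
    obtain ⟨k, hk, rfl⟩ := List.mem_map.mp hp
    have : k ∈ l := (PySem.Set.mem_ofList _ _).mp hk
    simpa using List.count_pos_iff.mpr this)]
  have hmap := pvFold_mstep_map (fun k => (k, (l.count k : Int))) (fun p => p.2)
    (PySem.Set.ofList l) none
  simp only [Option.map_none] at hmap
  rw [hmap]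
  unfold pvBest
  rw [pvMax?_nat_cast (PySem.List.dedup l) (fun c => l.count c), PySem.List.dedup_eq_ofList]
  cases hfold : (PySem.Set.ofList l).foldl (pvMStep (fun a => ((l.count a : Nat) : Int))) none with
  | none => rfl
  | some m => rfl

-- splitting A's two-dict loop into two counter folds
def pvG1 (d : PySem.Dict Char Int) (x : Char) : PySem.Dict Char Int :=
  if PySem.Chars.isalpha x then
    (if d.contains x then d.insert x (d.getD x 0 + 1) else d.insert x 1) else d

def pvG2 (d : PySem.Dict Char Int) (x : Char) : PySem.Dict Char Int :=
  if !PySem.Chars.isalpha x && !PySem.Chars.isspace x then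
    (if d.contains x then d.insert x (d.getD x 0 + 1) else d.insert x 1) else d

theorem pvSplit : ∀ (l : List Char) (d1 d2 : PySem.Dict Char Int),
    l.foldl pvStepA (d1, d2) = (l.foldl pvG1 d1, l.foldl pvG2 d2) := by
  intro l
  induction l with
  | nil => intro d1 d2; rfl
  | cons x t ih =>
    intro d1 d2
    have hstep : pvStepA (d1, d2) x = (pvG1 d1 x, pvG2 d2 x) := by
      unfold pvStepA pvG1 pvG2
      by_cases ha : PySem.Chars.isalpha x
      · simp [ha]
      · by_cases hs : PySem.Chars.isspace x
        · simp [ha, hs]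
        · simp [ha, hs]
    simp only [List.foldl_cons, hstep, ih]

theorem pvCounterFold (l : List Char) :
    l.foldl (fun (d : PySem.Dict Char Int) x =>
        if d.contains x then d.insert x (d.getD x 0 + 1) else d.insert x 1) PySem.Dict.empty
      = PySem.Dict.counter l := by
  rw [← PySem.Dict.foldl_insert_getD_add_one_eq_counter]
  apply PySem.List.foldl_congr_mem
  intro d x _
  by_cases hc : d.contains x
  · simp [hc]
  · have h0 : d.getD x 0 = 0 := PySem.Dict.getD_of_not_contains d 0 (by simpa using hc)
    simp [hc, h0]

theorem pvDict_fold (l : List Char) :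
    l.foldl pvStepA (PySem.Dict.empty, PySem.Dict.empty)
      = (PySem.Dict.counter (l.filter (fun c => PySem.Chars.isalpha c)),
         PySem.Dict.counter (l.filter (fun c => !PySem.Chars.isalpha c && !PySem.Chars.isspace c))) := by
  rw [pvSplit]
  unfold pvG1 pvG2
  rw [PySem.List.foldl_if_eq_foldl_filter, PySem.List.foldl_if_eq_foldl_filter,
    pvCounterFold, pvCounterFold]

-- ===== VERDICT (by name: the statement is the Claim_ definition above) =====
theorem larger_frequency_char_sym_spec : Claim_equal_larger_frequency_char_sym := by
  intro s _
  unfold Spec_larger_frequency_char_sym larger_frequency_char_sym larger_frequency_char_sym_alt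
  simp only [pvDict_fold, pvItems_scan]
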